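-- pv_equiv track=rewrite | github.com/pablo-meier/advent-2017 | day4/python/part1.py | reduce_row
-- ===== SOURCE A (Python) =====
-- def reduce_row(row, part2=False):
--     '''
--     Given a row of passwords, returns 1 if it's valid or 0 if not
--     '''
--     seen = set()
--     for password in row:
--         if part2:
--             password = ''.join(sorted(password))
--         if password in seen:
--             return 0
--         else:
--             seen.add(password)
--     return 1
-- ===== SOURCE B (Python) =====
-- def reduce_row(row, part2=False):
--     '''
--     Given a row of passwords, returns 1 if it's valid or 0 if not
--     '''
--     items = sorted(''.join(sorted(p)) for p in row) if part2 else sorted(row)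
--     for a, b in zip(items, items[1:]):
--         if a == b:
--             return 0
--     return 1
-- ===== Notes on version B (the rewrite author's own statement) =====
-- stated objective: alternative
-- what changed: Replaces A's incremental hash-set membership loop by sorting the (optionally letter-sorted) passwords and scanning adjacent pairs for an equal neighbour; duplicates are adjacent in a sorted list, so the two agree.
import Mathlib
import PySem

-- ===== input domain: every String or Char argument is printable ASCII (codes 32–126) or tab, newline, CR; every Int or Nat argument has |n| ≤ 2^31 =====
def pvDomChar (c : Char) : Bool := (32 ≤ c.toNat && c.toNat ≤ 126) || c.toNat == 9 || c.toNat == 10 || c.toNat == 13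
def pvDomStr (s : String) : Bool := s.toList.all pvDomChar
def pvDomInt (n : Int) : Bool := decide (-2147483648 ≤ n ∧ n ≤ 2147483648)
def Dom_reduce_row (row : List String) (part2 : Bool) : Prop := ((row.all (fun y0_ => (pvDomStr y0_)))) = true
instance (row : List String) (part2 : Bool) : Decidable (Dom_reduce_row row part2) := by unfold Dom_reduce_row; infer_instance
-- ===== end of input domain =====

-- B replaces A's incremental seen-set loop by sorting the processed list and scanning adjacent
-- pairs for an equal neighbour (duplicates are adjacent after sorting); same answer, different algorithm.

-- ''.join(sorted(password))
def pvSortStr (p : String) : String := String.ofList (PySem.List.sorted p.toList (fun c => c) false)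

-- ===== PORT A =====
def reduceRowLoop (part2 : Bool) : List String → PySem.Set String → Int
  | [], _ => 1
  | password :: rest, seen =>
    let password := if part2 then pvSortStr password else password
    if PySem.Set.contains seen password then 0
    else reduceRowLoop part2 rest (PySem.Set.add seen password)

def reduce_row (row : List String) (part2 : Bool) : Int :=
  reduceRowLoop part2 row PySem.Set.empty

-- ===== PORT B =====
-- the 'for a, b in zip(items, items[1:])' scan of Source B
def hasAdjDup : List String → Bool
  | a :: b :: rest => if a = b then true else hasAdjDup (b :: rest)
  | _ => false

def reduce_row_alt (row : List String) (part2 : Bool) : Int :=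
  let items := PySem.List.sorted (if part2 then row.map pvSortStr else row) (fun x => x) false
  if hasAdjDup items then 0 else 1

-- ===== PRECONDITION & SPEC =====
def Spec_reduce_row (row : List String) (part2 : Bool) (out : Int) : Prop := out = reduce_row_alt row part2
instance (row : List String) (part2 : Bool) (out : Int) : Decidable (Spec_reduce_row row part2 out) := by unfold Spec_reduce_row; infer_instance

-- ===== CLAIM (what is proved, stated in full; the proofs are below) =====
def Claim_equal_reduce_row : Prop := ∀ (row : List String) (part2 : Bool), Dom_reduce_row row part2 → Spec_reduce_row row part2 (reduce_row row part2)

-- ===== LEMMAS AND PROOFS =====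

-- A's loop with the per-element transformation already applied to the list
def plainLoop : List String → PySem.Set String → Int
  | [], _ => 1
  | x :: rest, seen =>
    if PySem.Set.contains seen x then 0 else plainLoop rest (PySem.Set.add seen x)

theorem reduceRowLoop_eq_plainLoop (part2 : Bool) (l : List String) (s : PySem.Set String) :
    reduceRowLoop part2 l s = plainLoop (if part2 then l.map pvSortStr else l) s := by
  induction l generalizing s with
  | nil => cases part2 <;> rfl
  | cons x r ih => cases part2 <;> simp [reduceRowLoop, plainLoop, ih]

-- A's loop returns 1 exactly on a duplicate-free list disjoint from the seen set
theorem plainLoop_eq (l s : List String) :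
    plainLoop l s = if l.Nodup ∧ ∀ x ∈ l, x ∉ s then 1 else 0 := by
  induction l generalizing s with
  | nil => simp [plainLoop]
  | cons x r ih =>
    simp only [plainLoop]
    by_cases hx : x ∈ s
    · rw [if_pos (by simpa [PySem.Set.contains_iff] using hx)]
      rw [if_neg (by intro ⟨_, h⟩; exact h x (List.mem_cons_self) hx)]
    · rw [if_neg (by simpa [PySem.Set.contains_iff] using hx)]
      rw [ih, PySem.Set.add_of_not_mem hx]
      congr 1
      simp only [List.nodup_cons, List.mem_cons, List.mem_append, List.not_mem_nil,
        or_false, not_or, eq_iff_iff]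
      constructor
      · rintro ⟨hr, hall⟩
        exact ⟨⟨fun hxr => (hall x hxr).2 rfl, hr⟩, by
          rintro y (rfl | hy)
          · exact hx
          · exact (hall y hy).1⟩
      · rintro ⟨⟨hxr, hr⟩, hall⟩
        exact ⟨hr, fun y hy => ⟨hall y (Or.inr hy), fun h => hxr (h ▸ hy)⟩⟩

-- on a ≤-sorted list, no equal adjacent pair ↔ no duplicates at all
theorem hasAdjDup_false_iff (l : List String) (hp : l.Pairwise (· ≤ ·)) :
    hasAdjDup l = false ↔ l.Nodup := by
  induction l with
  | nil => simp [hasAdjDup]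
  | cons a t ih =>
    cases t with
    | nil => simp [hasAdjDup]
    | cons b r =>
      rcases List.pairwise_cons.mp hp with ⟨ha, hp'⟩
      by_cases hab : a = b
      · simp [hasAdjDup, hab]
      · have hlt : a < b := lt_of_le_of_ne (ha b List.mem_cons_self) hab
        rw [show hasAdjDup (a :: b :: r) = hasAdjDup (b :: r) from by
              simp [hasAdjDup, hab]]
        rw [ih hp']
        simp only [List.nodup_cons, List.mem_cons]
        constructor
        · intro h
          refine ⟨fun h' => ?_, h⟩
          rcases List.pairwise_cons.mp hp' with ⟨hb, _⟩
          rcases h' with h' | h'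
          · exact hab h'
          · exact absurd rfl (ne_of_lt (lt_of_lt_of_le hlt (hb a h')))
        · rintro ⟨_, h⟩; exact h

-- ===== VERDICT (by name: the statement is the Claim_ definition above) =====
theorem reduce_row_spec : Claim_equal_reduce_row := by
  intro row part2 _
  simp only [Spec_reduce_row, reduce_row, reduce_row_alt]
  rw [reduceRowLoop_eq_plainLoop, show PySem.Set.empty = ([] : List String) from rfl, plainLoop_eq]
  generalize (if part2 = true then row.map pvSortStr else row) = items
  have hperm := PySem.List.sorted_perm items (fun x => x) false
  have hsorted := PySem.List.sorted_pairwise (xs := items) (key := fun x => x)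
  have hiff : (hasAdjDup (PySem.List.sorted items (fun x => x) false) = true) ↔ ¬ items.Nodup := by
    rw [← hperm.nodup_iff, ← hasAdjDup_false_iff _ hsorted]
    simp [Bool.not_eq_false]
  by_cases h : items.Nodup
  · rw [if_pos ⟨h, by simp⟩, if_neg (by simp [hiff, h])]
  · rw [if_neg (by tauto), if_pos (hiff.mpr h)]
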